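-- pv_equiv track=rewrite | github.com/Lisafiluz/Advent_of_code_2020 | day6/day6.py | get_sum_of_group
-- ===== SOURCE A (Python) =====
-- def get_sum_of_group(group_answers_list):
--     answers = {}
--     for person in group_answers_list:
--         for answer in person:
--             if answer not in answers:
--                 answers[answer] = 1
--             else:
--                 answers[answer] += 1
--     # return sum
--     # part 2
--     all_answers = 0
--     for answer, count in answers.items():
--         if count == len(group_answers_list):
--             all_answers += 1
--     return all_answers
-- ===== SOURCE B (Python) =====
-- def get_sum_of_group(group_answers_list):
--     # Alternative algorithm: flatten all answers, sort, count runs whose length == group size.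
--     chars = sorted(c for person in group_answers_list for c in person)
--     n = len(group_answers_list)
--     m = len(chars)
--     total = 0
--     i = 0
--     while i < m:
--         j = i + 1
--         while j < m and chars[j] == chars[i]:
--             j += 1
--         if j - i == n:
--             total += 1
--         i = j
--     return total
-- ===== Notes on version B (the rewrite author's own statement) =====
-- stated objective: alternative
-- what changed: Replaces the character-count dictionary plus items scan with flattening all answers into one list, sorting it, and counting maximal runs of equal characters whose length equals the group size.
import Mathlib
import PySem

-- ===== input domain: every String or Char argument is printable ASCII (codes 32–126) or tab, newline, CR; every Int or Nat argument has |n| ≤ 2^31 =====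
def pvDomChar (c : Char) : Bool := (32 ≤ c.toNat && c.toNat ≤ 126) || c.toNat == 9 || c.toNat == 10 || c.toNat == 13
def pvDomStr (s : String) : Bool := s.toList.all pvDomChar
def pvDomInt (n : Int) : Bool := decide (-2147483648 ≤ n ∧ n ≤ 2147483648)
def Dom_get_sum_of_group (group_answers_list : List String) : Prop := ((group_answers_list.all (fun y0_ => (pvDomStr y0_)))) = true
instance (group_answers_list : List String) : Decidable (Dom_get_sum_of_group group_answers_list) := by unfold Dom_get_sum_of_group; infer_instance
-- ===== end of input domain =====

-- B replaces A's character-count dictionary with flatten, sort, and count runs of equal characters (alternative algorithm, same results).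

-- ===== PORT A =====
def get_sum_of_group (group_answers_list : List String) : Int :=
  let answers : PySem.Dict Char Int :=
    group_answers_list.foldl (fun d person =>
      person.toList.foldl (fun d answer =>
        if d.contains answer then d.insert answer (d.getD answer 0 + 1)
        else d.insert answer 1) d) PySem.Dict.empty
  answers.items.foldl (fun acc p =>
    if p.2 = (group_answers_list.length : Int) then acc + 1 else acc) 0

-- ===== PORT B =====
-- the run-counting while loop of Source B: each step consumes the maximal run at the head
def pvCountRuns (n : Int) : List Char → Int
  | [] => 0
  | c :: rest =>
      (if ((rest.takeWhile (fun x => x == c)).length + 1 : Int) = n then 1 else 0)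
      + pvCountRuns n (rest.dropWhile (fun x => x == c))
termination_by l => l.length
decreasing_by
  simpa using Nat.lt_succ_of_le (List.length_dropWhile_le _ _)


def get_sum_of_group_alt (group_answers_list : List String) : Int :=
  let chars := PySem.List.sorted (group_answers_list.flatMap (fun p => p.toList)) (fun x => x) false
  pvCountRuns (group_answers_list.length : Int) chars

-- ===== PRECONDITION & SPEC =====
def Spec_get_sum_of_group (group_answers_list : List String) (out : Int) : Prop := out = get_sum_of_group_alt group_answers_list
instance (group_answers_list : List String) (out : Int) : Decidable (Spec_get_sum_of_group group_answers_list out) := by unfold Spec_get_sum_of_group; infer_instance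

-- ===== CLAIM (what is proved, stated in full; the proofs are below) =====
def Claim_equal_get_sum_of_group : Prop := ∀ (group_answers_list : List String), Dom_get_sum_of_group group_answers_list → Spec_get_sum_of_group group_answers_list (get_sum_of_group group_answers_list)

-- ===== LEMMAS AND PROOFS =====

-- A's dict-update branch is always insert of getD+1 (getD of a missing key is 0)
lemma pvA_fold_fun_eq (d : PySem.Dict Char Int) (a : Char) :
    (if d.contains a then d.insert a (d.getD a 0 + 1) else d.insert a 1)
      = d.insert a (d.getD a 0 + 1) := by
  by_cases h : d.contains a = true
  · simp [h]
  · have h0 : d.getD a 0 = 0 :=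
      PySem.Dict.getD_of_not_contains _ _ (by simpa using h)
    simp [h, h0]

-- run counting on a weakly sorted list counts the distinct values whose multiplicity is n
lemma pvCountRuns_spec (n : Int) : ∀ (k : Nat) (l : List Char), l.length ≤ k →
    l.Pairwise (· ≤ ·) →
    pvCountRuns n l
      = ((PySem.Set.ofList l).countP (fun v => decide ((l.count v : Int) = n)) : Int) := by
  intro k
  induction k with
  | zero =>
    intro l hl _
    have : l = [] := List.eq_nil_of_length_eq_zero (Nat.le_zero.mp hl)
    subst this
    simp [pvCountRuns, PySem.Set.ofList]
  | succ k ih =>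
    intro l hl hs
    match l with
    | [] => simp [pvCountRuns, PySem.Set.ofList]
    | c :: rest =>
      have hc : ∀ y ∈ rest, c ≤ y := (List.pairwise_cons.mp hs).1
      have hrestp : rest.Pairwise (· ≤ ·) := (List.pairwise_cons.mp hs).2
      set run := rest.takeWhile (fun x => x == c) with hrundef
      set rest' := rest.dropWhile (fun x => x == c) with hrestdef
      have hsplit : run ++ rest' = rest := List.takeWhile_append_dropWhile
      have hrun : ∀ x ∈ run, x = c := fun x hx => by
        simpa using List.mem_takeWhile_imp hx
      have hrp : rest'.Pairwise (· ≤ ·) := hrestp.sublist (List.dropWhile_sublist _)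
      have hcnot : c ∉ rest' := by
        intro hmem
        have hne : rest' ≠ [] := List.ne_nil_of_mem hmem
        obtain ⟨x, t, hxt⟩ := List.exists_cons_of_ne_nil hne
        have hx' : (x == c) = false := by
          have := List.head_dropWhile_not (fun y => y == c) (l := rest)
          rw [← hrestdef] at this
          simpa [hxt] using this hne
        have hxnec : x ≠ c := by simpa using hx'
        rcases List.mem_cons.mp (hxt ▸ hmem) with h | h
        · exact hxnec h.symm
        · have h1 : x ≤ c := by
            have := hrp; rw [hxt] at this
            exact (List.pairwise_cons.mp this).1 c h
          have h2 : c ≤ x := hc _ (by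
            rw [← hsplit]; exact List.mem_append_right _ (by rw [hxt]; exact List.mem_cons_self))
          exact hxnec (le_antisymm h1 h2)
      have hcountc : (c :: rest).count c = run.length + 1 := by
        have h1 : run.count c = run.length := List.count_eq_length.mpr (fun b hb => ((hrun b hb).symm ▸ rfl))
        have h2 : rest'.count c = 0 := List.count_eq_zero.mpr hcnot
        rw [List.count_cons_self, ← hsplit, List.count_append, h1, h2]
      have hcountne : ∀ v, v ≠ c → (c :: rest).count v = rest'.count v := by
        intro v hv
        have h1 : run.count v = 0 := List.count_eq_zero.mpr (fun hm => hv (hrun v hm))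
        rw [← hsplit]
        simp [List.count_append, h1, Ne.symm hv]
      -- ofList (c :: rest) is a permutation of c :: ofList rest'
      have hperm : (PySem.Set.ofList (c :: rest)).Perm (c :: PySem.Set.ofList rest') := by
        apply (List.perm_ext_iff_of_nodup (PySem.Set.nodup_ofList _) ?_).mpr
        · intro x
          simp only [PySem.Set.mem_ofList, List.mem_cons]
          constructor
          · rintro (rfl | hx)
            · exact Or.inl rfl
            · rw [← hsplit] at hx
              rcases List.mem_append.mp hx with h | h
              · exact Or.inl (hrun x h)
              · exact Or.inr (by simpa [PySem.Set.mem_ofList] using h)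
          · rintro (rfl | hx)
            · exact Or.inl rfl
            · refine Or.inr ?_
              rw [← hsplit]
              exact List.mem_append_right _ (by simpa [PySem.Set.mem_ofList] using hx)
        · exact List.nodup_cons.mpr ⟨by simpa [PySem.Set.mem_ofList] using hcnot, PySem.Set.nodup_ofList _⟩
      have hlen' : rest'.length ≤ k := by
        have h3 : rest'.length ≤ rest.length := hrestdef ▸ List.length_dropWhile_le _ _
        have hlc : rest.length + 1 ≤ k + 1 := by simpa using hl
        omega
      have hih := ih rest' hlen' hrp
      have hstep : pvCountRuns n (c :: rest)
          = (if ((run.length : Int) + 1) = n then 1 else 0) + pvCountRuns n rest' := by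
        rw [pvCountRuns]
      rw [hstep, hih, (hperm.countP_eq _)]
      rw [List.countP_cons]
      have hcongr : (PySem.Set.ofList rest').countP (fun v => decide (((c :: rest).count v : Int) = n))
          = (PySem.Set.ofList rest').countP (fun v => decide ((rest'.count v : Int) = n)) := by
        apply List.countP_congr
        intro x hx
        have hxmem : x ∈ rest' := (PySem.Set.mem_ofList _ _).mp hx
        have hxne : x ≠ c := fun h => hcnot (h ▸ hxmem)
        simp [hcountne x hxne]
      have hpc : (decide (((c :: rest).count c : Int) = n)) = decide (((run.length : Int) + 1) = n) := by
        rw [hcountc]; push_cast; rfl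
      rw [hpc, hcongr]
      push_cast
      by_cases hn : ((run.length : Int) + 1) = n
      · simp [hn]
        omega
      · simp [hn]

theorem pv_main_eq (gs : List String) :
    get_sum_of_group gs = get_sum_of_group_alt gs := by
  unfold get_sum_of_group get_sum_of_group_alt
  simp only []
  set flat := gs.flatMap (fun p => p.toList) with hflat
  set n : Int := (gs.length : Int) with hn
  have hA : gs.foldl (fun d person =>
      person.toList.foldl (fun d answer =>
        if d.contains answer then d.insert answer (d.getD answer 0 + 1)
        else d.insert answer 1) d) PySem.Dict.empty = PySem.Dict.counter flat := by
    have hfun : (fun (d : PySem.Dict Char Int) (answer : Char) =>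
        if d.contains answer then d.insert answer (d.getD answer 0 + 1)
        else d.insert answer 1)
        = fun d answer => d.insert answer (d.getD answer 0 + 1) :=
      funext fun d => funext fun a => pvA_fold_fun_eq d a
    rw [hfun, ← List.foldl_flatMap]
    exact PySem.Dict.foldl_insert_getD_add_one_eq_counter flat
  rw [hA, PySem.Dict.items_counter, List.foldl_map,
    PySem.List.foldl_ite_add_one (fun k => ((flat.count k : Int) = n))]
  set sl := PySem.List.sorted flat (fun x => x) false with hsl
  have hsp : sl.Pairwise (· ≤ ·) := by
    have := PySem.List.sorted_pairwise flat (fun x => x)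
    simpa [hsl] using this
  have hperm2 : sl.Perm flat := PySem.List.sorted_perm _ _ _
  rw [pvCountRuns_spec n sl.length sl le_rfl hsp]
  have hofperm : (PySem.Set.ofList sl).Perm (PySem.Set.ofList flat) := by
    apply (List.perm_ext_iff_of_nodup (PySem.Set.nodup_ofList _) (PySem.Set.nodup_ofList _)).mpr
    intro x
    simp [PySem.Set.mem_ofList, hperm2.mem_iff]
  have hcongr2 : (PySem.Set.ofList sl).countP (fun v => decide ((sl.count v : Int) = n))
      = (PySem.Set.ofList sl).countP (fun v => decide ((flat.count v : Int) = n)) := by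
    apply List.countP_congr
    intro x _
    simp [hperm2.count_eq]
  rw [hcongr2, hofperm.countP_eq]
  simp

-- ===== VERDICT (by name: the statement is the Claim_ definition above) =====
theorem get_sum_of_group_spec : Claim_equal_get_sum_of_group := by
  intro gs _
  unfold Spec_get_sum_of_group
  exact pv_main_eq gs
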